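-- pv_equiv track=rewrite | github.com/rpdahxn/CodingTest | _PGSLv1/[PGS]133499.py | solution
-- ===== SOURCE A (Python) =====
-- def solution(babbling):
--     answer = 0
--     nephew = ["aya", "ye", "woo", "ma"]
--
--     for b in babbling:
--         for i in range(4):
--             if nephew[i]*2 in b:
--                 break
--             else:
--                 b = b.replace(nephew[i], " ")
--         if len(b.strip()) == 0:
--             answer += 1
--
--     return answer
-- ===== SOURCE B (Python) =====
-- def solution(babbling):
--     words = ("aya", "ye", "woo", "ma")
--     def ok(s):
--         prev = None
--         i = 0
--         n = len(s)
--         while i < n: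
--             if s[i].isspace():
--                 prev = None
--                 i += 1
--                 continue
--             for w in words:
--                 if s.startswith(w, i) and w != prev:
--                     prev = w
--                     i += len(w)
--                     break
--             else:
--                 return False
--         return True
--     return sum(1 for b in babbling if ok(b))
-- ===== Notes on version B (the rewrite author's own statement) =====
-- stated objective: alternative
-- what changed: Replaces A's repeated whole-string passes per babbling string (doubled-word substring test plus replace-every-occurrence-with-a-space for each of the four words, then strip) by a single left-to-right tokenizing parser that matches one word at a time, rejects two equal consecutive tokens via a prev variable, and treats whitespace as a separator.
import Mathlib
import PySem

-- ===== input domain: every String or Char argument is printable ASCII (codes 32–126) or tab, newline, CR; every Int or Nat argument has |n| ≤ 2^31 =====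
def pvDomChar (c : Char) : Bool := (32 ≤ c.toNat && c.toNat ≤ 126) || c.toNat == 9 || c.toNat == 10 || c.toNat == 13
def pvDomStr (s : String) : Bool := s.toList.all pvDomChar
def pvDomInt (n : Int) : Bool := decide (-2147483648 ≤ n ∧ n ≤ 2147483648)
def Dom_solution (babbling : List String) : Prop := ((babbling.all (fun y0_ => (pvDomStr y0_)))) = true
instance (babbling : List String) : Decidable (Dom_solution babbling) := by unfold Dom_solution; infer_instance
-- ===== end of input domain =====

-- B replaces A's per-word whole-string passes (doubled-word test, replace-with-space, strip) by a
-- single left-to-right tokenizing parser with a previous-token register; same return value.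

-- ===== PORT A =====
def nephewA : List String := ["aya", "ye", "woo", "ma"]

-- the inner loop 'for i in range(4): if nephew[i]*2 in b: break; else: b = b.replace(nephew[i], " ")'
def loopA : List String → String → String
  | [], b => b
  | w :: ws, b =>
    if PySem.Str.isIn (w ++ w) b then b
    else loopA ws (PySem.Str.replace b w " ")

def solution (babbling : List String) : Int :=
  babbling.foldl
    (fun answer b =>
      if PySem.Str.len (PySem.Str.strip (loopA nephewA b)) = 0 then answer + 1 else answer)
    0

-- ===== PORT B =====
def wordsB : List (List Char) := [['a','y','a'], ['y','e'], ['w','o','o'], ['m','a']]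

-- Source B's while loop over the index i, written on the suffix s[i:]; fuel = remaining length
-- (each iteration consumes at least one character), in the style of PySem.Chars.replace.go.
def okGo : Nat → List Char → Option (List Char) → Bool
  | _, [], _ => true
  | 0, _ :: _, _ => false
  | fuel + 1, c :: t, prev =>
    if PySem.Chars.isspace c then okGo fuel t none
    else
      match wordsB.find? (fun w => PySem.Chars.startswith (c :: t) w && (some w != prev)) with
      | some w => okGo fuel ((c :: t).drop w.length) (some w)
      | none => false

def okB (s : List Char) (prev : Option (List Char)) : Bool := okGo s.length s prev

def solution_alt (babbling : List String) : Int :=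
  (babbling.map (fun b => if okB b.toList none then (1 : Int) else 0)).sum

-- ===== PRECONDITION & SPEC =====
def Spec_solution (babbling : List String) (out : Int) : Prop := out = solution_alt babbling
instance (babbling : List String) (out : Int) : Decidable (Spec_solution babbling out) := by unfold Spec_solution; infer_instance

-- ===== CLAIM (what is proved, stated in full; the proofs are below) =====
def Claim_equal_solution : Prop := ∀ (babbling : List String), Dom_solution babbling → Spec_solution babbling (solution babbling)

-- ===== LEMMAS AND PROOFS =====

def rp (w : List Char) (x : List Char) : List Char :=
  match x with
  | [] => []
  | c :: t =>
    if w.isPrefixOf (c :: t) && !w.isEmpty then ' ' :: rp w (t.drop (w.length - 1))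
    else c :: rp w t
termination_by x.length
decreasing_by
  all_goals simp

@[simp] lemma rp_nil (w : List Char) : rp w [] = [] := by rw [rp.eq_def]

lemma rp_cons (w : List Char) (c : Char) (t : List Char) :
    rp w (c :: t) = if w.isPrefixOf (c :: t) && !w.isEmpty then ' ' :: rp w (t.drop (w.length - 1))
      else c :: rp w t := by
  rw [rp.eq_def]

lemma rp_neg {w : List Char} {c : Char} {t : List Char} (h : ¬ w <+: (c :: t)) :
    rp w (c :: t) = c :: rp w t := by
  rw [rp_cons]
  simp [List.isPrefixOf_iff_prefix, h]

lemma rp_pos {w : List Char} {c : Char} {t : List Char} (hw : w ≠ []) (h : w <+: (c :: t)) :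
    rp w (c :: t) = ' ' :: rp w ((c :: t).drop w.length) := by
  rw [rp_cons]
  have h2 : w.length - 1 + 1 = w.length := Nat.succ_pred_eq_of_pos (List.length_pos_of_ne_nil hw)
  split_ifs with h'
  · conv_rhs => rw [← h2, List.drop_succ_cons]
  · exfalso
    simp [List.isPrefixOf_iff_prefix, h, hw] at h'

lemma go_spec (w : List Char) (hw : w ≠ []) : ∀ (fuel : Nat) (l acc : List Char), l.length ≤ fuel →
    PySem.Chars.replace.go w [' '] fuel l acc = acc.reverse ++ rp w l := by
  intro fuel
  induction fuel with
  | zero =>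
    intro l acc hl
    have : l = [] := by simpa using List.eq_nil_of_length_eq_zero (Nat.le_zero.mp hl)
    subst this
    simp [PySem.Chars.replace.go]
  | succ n ih =>
    intro l acc hl
    cases l with
    | nil => simp [PySem.Chars.replace.go]
    | cons c t =>
      rw [PySem.Chars.replace.go]
      by_cases hp : w <+: (c :: t)
      · have hpb : w.isPrefixOf (c :: t) = true := by simpa [List.isPrefixOf_iff_prefix] using hp
        rw [if_pos hpb]
        have hlen : (List.drop w.length (c :: t)).length ≤ n := by
          have := List.length_pos_of_ne_nil hw
          simp at hl ⊢
          omega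
        rw [ih _ _ hlen, rp_pos hw hp]
        simp
      · rw [if_neg (by simp [List.isPrefixOf_iff_prefix, hp])]
        rw [ih _ _ (by simpa using Nat.le_of_succ_le_succ (by simpa using hl)), rp_neg hp]
        simp

lemma replace_eq_rp (w : List Char) (hw : w ≠ []) (x : List Char) :
    PySem.Chars.replace x w [' '] = rp w x := by
  rw [PySem.Chars.replace]
  rw [if_neg (by simp [hw])]
  simpa using go_spec w hw x.length x [] le_rfl

def Z (l : List Char) : Bool := l.all PySem.Chars.isspace

lemma strip_eq_nil_iff (l : List Char) : PySem.Chars.strip l = [] ↔ Z l = true := by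
  rw [PySem.Chars.strip, PySem.Chars.rstrip, PySem.Chars.lstrip]
  constructor
  · intro h
    have h2 : List.dropWhile PySem.Chars.isspace (List.dropWhile PySem.Chars.isspace l).reverse = [] := by
      simpa using congrArg List.reverse h
    rw [List.dropWhile_eq_nil_iff] at h2
    have h3 : ∀ c ∈ List.dropWhile PySem.Chars.isspace l, PySem.Chars.isspace c := by
      intro c hc
      exact h2 c (List.mem_reverse.mpr hc)
    simp only [Z, List.all_eq_true]
    intro c hc
    rw [← List.takeWhile_append_dropWhile (p := PySem.Chars.isspace) (l := l)] at hc
    rcases List.mem_append.mp hc with h' | h'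
    · exact List.mem_takeWhile_imp h'
    · exact h3 c h'
  · intro h
    have h1 : List.dropWhile PySem.Chars.isspace l = [] := by
      rw [List.dropWhile_eq_nil_iff]
      intro c hc
      exact (List.all_eq_true.mp h) c hc
    simp [h1]

lemma Z_cons (c : Char) (x : List Char) : Z (c :: x) = (PySem.Chars.isspace c && Z x) := by
  simp [Z]

lemma Z_false_of_mem {c : Char} {x : List Char} (hc : c ∈ x)
    (hs : PySem.Chars.isspace c = false) : Z x = false := by
  simp only [Z, List.all_eq_false]
  exact ⟨c, hc, by simp [hs]⟩

lemma isIn_cons (sub : List Char) (c : Char) (t : List Char) :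
    PySem.Chars.isIn sub (c :: t) = (sub.isPrefixOf (c :: t) || PySem.Chars.isIn sub t) := by
  by_cases h : sub <+: (c :: t)
  · rw [(PySem.Chars.isIn_iff_infix _ _).mpr (h.isInfix)]
    simp [List.isPrefixOf_iff_prefix, h]
  · by_cases h2 : PySem.Chars.isIn sub t = true
    · rw [h2, (PySem.Chars.isIn_iff_infix _ _).mpr ((List.infix_cons ((PySem.Chars.isIn_iff_infix _ _).mp h2)))]
      simp
    · have h3 : PySem.Chars.isIn sub (c :: t) = false := by
        rw [(PySem.Chars.isIn_eq_false_iff _ _)]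
        intro hinf
        rcases List.infix_cons_iff.mp hinf with h' | h'
        · exact h h'
        · exact h2 ((PySem.Chars.isIn_iff_infix _ _).mpr h')
      have h4 : PySem.Chars.isIn sub t = false := by simpa using h2
      rw [h3, h4]
      simp only [Bool.or_false, Bool.false_eq]
      rw [← Bool.not_eq_true, List.isPrefixOf_iff_prefix]
      exact h

lemma isIn_nil {sub : List Char} (h : sub ≠ []) : PySem.Chars.isIn sub [] = false := by
  rw [(PySem.Chars.isIn_eq_false_iff _ _)]
  intro hinf
  exact h (List.eq_nil_of_infix_nil hinf)

lemma isIn_of_prefix {sub s : List Char} (h : sub <+: s) : PySem.Chars.isIn sub s = true :=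
  (PySem.Chars.isIn_iff_infix _ _).mpr h.isInfix

lemma Z_false_of_isIn {d x : List Char} {c : Char} (hc : c ∈ d)
    (hs : PySem.Chars.isspace c = false) (h : PySem.Chars.isIn d x = true) : Z x = false := by
  have hinf := (PySem.Chars.isIn_iff_infix _ _).mp h
  exact Z_false_of_mem (hinf.sublist.subset hc) hs

lemma rp_head? {w : List Char} (hw : w ≠ []) (x : List Char) :
    (rp w x).head? = if w <+: x then some ' ' else x.head? := by
  cases x with
  | nil =>
    rw [if_neg (by intro h; exact hw (List.prefix_nil.mp h))]
    simp
  | cons c t =>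
    by_cases h : w <+: (c :: t)
    · rw [rp_pos hw h, if_pos h]; rfl
    · rw [rp_neg h, if_neg h]; rfl

lemma head?_rp {w : List Char} {x : List Char} {c : Char} (hw : w ≠ [])
    (h : (rp w x).head? = some c) (hc : c ≠ ' ') : x.head? = some c := by
  rw [rp_head? hw] at h
  split_ifs at h with h'
  · exact absurd (Option.some.inj h).symm hc
  · exact h

lemma single_prefix {c : Char} {y : List Char} : [c] <+: y ↔ y.head? = some c := by
  constructor
  · rintro ⟨r, rfl⟩; rfl
  · intro h
    cases y with
    | nil => simp at h
    | cons d t => exact ⟨t, by simp_all⟩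

lemma single_prefix_rp {w : List Char} {c : Char} {x : List Char} (hw : w ≠ [])
    (hc : c ≠ ' ') (h : [c] <+: rp w x) : [c] <+: x := by
  rw [single_prefix] at h ⊢
  exact head?_rp hw h hc

lemma oo_stab {w : List Char} (hw : w ≠ []) (hwh : w.head? ≠ some 'o') {x : List Char}
    (h : ¬ ['o','o'] <+: x) : ¬ ['o','o'] <+: rp w x := by
  intro hp
  have h1 : (rp w x).head? = some 'o' := by
    obtain ⟨r, hr⟩ := hp; rw [← hr]; rfl
  have h2 : x.head? = some 'o' := head?_rp hw h1 (by decide)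
  cases x with
  | nil => simp at h2
  | cons d t =>
    simp at h2
    subst h2
    have hnp : ¬ w <+: ('o' :: t) := by
      intro hwp
      cases w with
      | nil => exact hw rfl
      | cons e ws => exact hwh (by simpa using (List.cons_prefix_cons.mp hwp).1 ▸ rfl)
    rw [rp_neg hnp] at hp
    have h3 : ['o'] <+: rp w t := (List.cons_prefix_cons.mp hp).2
    have h4 : t.head? = some 'o' := head?_rp hw (single_prefix.mp h3) (by decide)
    apply h
    cases t with
    | nil => simp at h4
    | cons e t' => simp at h4; subst h4; exact ⟨t', rfl⟩

def wA1 : List Char := ['a','y','a']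
def wA2 : List Char := ['y','e']
def wA3 : List Char := ['w','o','o']
def wA4 : List Char := ['m','a']

def chk4 (x : List Char) : Bool :=
  if PySem.Chars.isIn (wA4 ++ wA4) x then Z x else Z (rp wA4 x)
def chk3 (x : List Char) : Bool :=
  if PySem.Chars.isIn (wA3 ++ wA3) x then Z x else chk4 (rp wA3 x)
def chk2 (x : List Char) : Bool :=
  if PySem.Chars.isIn (wA2 ++ wA2) x then Z x else chk3 (rp wA2 x)
def chkA (l : List Char) : Bool :=
  if PySem.Chars.isIn (wA1 ++ wA1) l then Z l else chk2 (rp wA1 l)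

lemma notpre_dbl {w : List Char} {c : Char} {x : List Char} (h : ¬ w <+: (c :: x)) :
    (w ++ w).isPrefixOf (c :: x) = false := by
  rw [← Bool.not_eq_true, List.isPrefixOf_iff_prefix]
  intro hp
  exact h ((List.prefix_append w w).trans hp)

lemma chk4_cons {c : Char} {x : List Char} (h4 : ¬ wA4 <+: (c :: x)) :
    chk4 (c :: x) = (PySem.Chars.isspace c && chk4 x) := by
  unfold chk4
  rw [isIn_cons, notpre_dbl h4, Bool.false_or, rp_neg h4]
  by_cases h : PySem.Chars.isIn (wA4 ++ wA4) x = true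
  · rw [if_pos h, if_pos h, Z_cons]
  · rw [if_neg h, if_neg h, Z_cons]

lemma chk3_cons {c : Char} {x : List Char} (h3 : ¬ wA3 <+: (c :: x))
    (h4 : ¬ wA4 <+: (c :: rp wA3 x)) :
    chk3 (c :: x) = (PySem.Chars.isspace c && chk3 x) := by
  unfold chk3
  rw [isIn_cons, notpre_dbl h3, Bool.false_or, rp_neg h3]
  by_cases h : PySem.Chars.isIn (wA3 ++ wA3) x = true
  · rw [if_pos h, if_pos h, Z_cons]
  · rw [if_neg h, if_neg h, chk4_cons h4]

lemma chk2_cons {c : Char} {x : List Char} (h2 : ¬ wA2 <+: (c :: x))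
    (h3 : ¬ wA3 <+: (c :: rp wA2 x)) (h4 : ¬ wA4 <+: (c :: rp wA3 (rp wA2 x))) :
    chk2 (c :: x) = (PySem.Chars.isspace c && chk2 x) := by
  unfold chk2
  rw [isIn_cons, notpre_dbl h2, Bool.false_or, rp_neg h2]
  by_cases h : PySem.Chars.isIn (wA2 ++ wA2) x = true
  · rw [if_pos h, if_pos h, Z_cons]
  · rw [if_neg h, if_neg h, chk3_cons h3 h4]

lemma chkA_cons {c : Char} {x : List Char} (h1 : ¬ wA1 <+: (c :: x))
    (h2 : ¬ wA2 <+: (c :: rp wA1 x)) (h3 : ¬ wA3 <+: (c :: rp wA2 (rp wA1 x)))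
    (h4 : ¬ wA4 <+: (c :: rp wA3 (rp wA2 (rp wA1 x)))) :
    chkA (c :: x) = (PySem.Chars.isspace c && chkA x) := by
  unfold chkA
  rw [isIn_cons, notpre_dbl h1, Bool.false_or, rp_neg h1]
  by_cases h : PySem.Chars.isIn (wA1 ++ wA1) x = true
  · rw [if_pos h, if_pos h, Z_cons]
  · rw [if_neg h, if_neg h, chk2_cons h2 h3 h4]

lemma pre2_conv {c : Char} {x y : List Char} (hy : y = rp wA1 x)
    (h : wA2 <+: (c :: y)) : wA2 <+: (c :: x) := by
  obtain ⟨h1, h2⟩ := List.cons_prefix_cons.mp h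
  exact List.cons_prefix_cons.mpr ⟨h1, single_prefix_rp (by decide) (by decide) (hy ▸ h2)⟩

lemma pre3_conv {c : Char} {x y : List Char} (hy : y = rp wA2 (rp wA1 x))
    (h : wA3 <+: (c :: y)) : wA3 <+: (c :: x) := by
  obtain ⟨h1, h2⟩ := List.cons_prefix_cons.mp h
  refine List.cons_prefix_cons.mpr ⟨h1, ?_⟩
  by_contra hoo
  exact oo_stab (by decide) (by decide) (oo_stab (by decide) (by decide) hoo) (hy ▸ h2)

lemma pre4_conv {c : Char} {x y : List Char} (hy : y = rp wA3 (rp wA2 (rp wA1 x)))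
    (h : wA4 <+: (c :: y)) : wA4 <+: (c :: x) := by
  obtain ⟨h1, h2⟩ := List.cons_prefix_cons.mp h
  exact List.cons_prefix_cons.mpr ⟨h1,
    single_prefix_rp (by decide) (by decide)
      (single_prefix_rp (by decide) (by decide)
        (single_prefix_rp (by decide) (by decide) (hy ▸ h2)))⟩

lemma chkA_cons' {c : Char} {x : List Char} (h1 : ¬ wA1 <+: (c :: x))
    (h2 : ¬ wA2 <+: (c :: x)) (h3 : ¬ wA3 <+: (c :: x)) (h4 : ¬ wA4 <+: (c :: x)) :
    chkA (c :: x) = (PySem.Chars.isspace c && chkA x) :=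
  chkA_cons h1 (fun h => h2 (pre2_conv rfl h)) (fun h => h3 (pre3_conv rfl h))
    (fun h => h4 (pre4_conv rfl h))

lemma chk2_cons' {c : Char} {x : List Char} (h2 : ¬ wA2 <+: (c :: x))
    (h3 : ¬ wA3 <+: (c :: x)) (h4 : ¬ wA4 <+: (c :: x)) :
    chk2 (c :: x) = (PySem.Chars.isspace c && chk2 x) := by
  refine chk2_cons h2 ?_ ?_
  · intro h
    obtain ⟨hh, h2'⟩ := List.cons_prefix_cons.mp h
    apply h3
    refine List.cons_prefix_cons.mpr ⟨hh, ?_⟩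
    by_contra hoo
    exact oo_stab (by decide) (by decide) hoo h2'
  · intro h
    obtain ⟨hh, h2'⟩ := List.cons_prefix_cons.mp h
    exact h4 (List.cons_prefix_cons.mpr ⟨hh,
      single_prefix_rp (by decide) (by decide) (single_prefix_rp (by decide) (by decide) h2')⟩)

lemma notpre_head {w : List Char} {d c : Char} {ws x : List Char} (hw : w = d :: ws)
    (hne : d ≠ c) : ¬ w <+: (c :: x) := by
  subst hw
  intro h
  exact hne (List.cons_prefix_cons.mp h).1

lemma chk4_space (y : List Char) : chk4 (' ' :: y) = chk4 y := by
  rw [chk4_cons (notpre_head rfl (by decide))]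
  simp [PySem.Chars.isspace]

lemma chk3_space (y : List Char) : chk3 (' ' :: y) = chk3 y := by
  rw [chk3_cons (notpre_head rfl (by decide)) (notpre_head rfl (by decide))]
  simp [PySem.Chars.isspace]

lemma chk2_space (y : List Char) : chk2 (' ' :: y) = chk2 y := by
  rw [chk2_cons (notpre_head rfl (by decide)) (notpre_head rfl (by decide)) (notpre_head rfl (by decide))]
  simp [PySem.Chars.isspace]

lemma Z_head_false {c : Char} (x : List Char) (hs : PySem.Chars.isspace c = false) :
    Z (c :: x) = false := by
  rw [Z_cons, hs]; rfl

lemma stab2_fwd {t : List Char} (h : wA2 <+: rp wA1 t) : wA2 <+: t := by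
  have hy : (rp wA1 t).head? = some 'y' := by obtain ⟨r, hr⟩ := h; rw [← hr]; rfl
  have ht : t.head? = some 'y' := head?_rp (by decide) hy (by decide)
  cases t with
  | nil => simp at ht
  | cons c t' =>
    simp at ht; subst ht
    have n1 : ¬ wA1 <+: ('y' :: t') := notpre_head rfl (by decide)
    rw [rp_neg n1] at h
    exact List.cons_prefix_cons.mpr ⟨rfl,
      single_prefix_rp (by decide) (by decide) (List.cons_prefix_cons.mp h).2⟩

lemma stab3_fwd {t : List Char} (h : wA3 <+: rp wA2 (rp wA1 t)) : wA3 <+: t := by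
  have hy : (rp wA2 (rp wA1 t)).head? = some 'w' := by obtain ⟨r, hr⟩ := h; rw [← hr]; rfl
  have ht : t.head? = some 'w' :=
    head?_rp (by decide) (head?_rp (by decide) hy (by decide)) (by decide)
  cases t with
  | nil => simp at ht
  | cons c t' =>
    simp at ht; subst ht
    have n1 : ¬ wA1 <+: ('w' :: t') := notpre_head rfl (by decide)
    have n2 : ¬ wA2 <+: ('w' :: rp wA1 t') := notpre_head rfl (by decide)
    rw [rp_neg n1, rp_neg n2] at h
    refine List.cons_prefix_cons.mpr ⟨rfl, ?_⟩
    by_contra hoo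
    exact oo_stab (by decide) (by decide) (oo_stab (by decide) (by decide) hoo)
      (List.cons_prefix_cons.mp h).2

lemma stab4_fwd {t : List Char} (h : wA4 <+: rp wA3 (rp wA2 (rp wA1 t))) : wA4 <+: t := by
  have hy : (rp wA3 (rp wA2 (rp wA1 t))).head? = some 'm' := by
    obtain ⟨r, hr⟩ := h; rw [← hr]; rfl
  have ht : t.head? = some 'm' :=
    head?_rp (by decide) (head?_rp (by decide) (head?_rp (by decide) hy (by decide)) (by decide)) (by decide)
  cases t with
  | nil => simp at ht
  | cons c t' =>
    simp at ht; subst ht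
    have n1 : ¬ wA1 <+: ('m' :: t') := notpre_head rfl (by decide)
    have n2 : ¬ wA2 <+: ('m' :: rp wA1 t') := notpre_head rfl (by decide)
    have n3 : ¬ wA3 <+: ('m' :: rp wA2 (rp wA1 t')) := notpre_head rfl (by decide)
    rw [rp_neg n1, rp_neg n2, rp_neg n3] at h
    exact List.cons_prefix_cons.mpr ⟨rfl,
      single_prefix_rp (by decide) (by decide)
        (single_prefix_rp (by decide) (by decide)
          (single_prefix_rp (by decide) (by decide) (List.cons_prefix_cons.mp h).2))⟩

lemma tok2 (t : List Char) : chkA (wA2 ++ t) = if wA2 <+: t then false else chkA t := by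
  show chkA ('y' :: 'e' :: t) = _
  have n1a : ¬ wA1 <+: ('y' :: 'e' :: t) := notpre_head rfl (by decide)
  have n1b : ¬ wA1 <+: ('e' :: t) := notpre_head rfl (by decide)
  have e1 : PySem.Chars.isIn (wA1 ++ wA1) ('y' :: 'e' :: t) = PySem.Chars.isIn (wA1 ++ wA1) t := by
    rw [isIn_cons, notpre_dbl n1a, isIn_cons, notpre_dbl n1b, Bool.false_or, Bool.false_or]
  have r1 : rp wA1 ('y' :: 'e' :: t) = 'y' :: 'e' :: rp wA1 t := by
    rw [rp_neg n1a, rp_neg n1b]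
  unfold chkA
  rw [e1, r1]
  by_cases hd1 : PySem.Chars.isIn (wA1 ++ wA1) t = true
  · rw [if_pos hd1, if_pos hd1, Z_head_false _ (by decide),
      Z_false_of_isIn (c := 'a') (by decide) (by decide) hd1]
    simp
  · rw [if_neg hd1, if_neg hd1]
    by_cases hp2 : wA2 <+: t
    · rw [if_pos hp2]
      obtain ⟨r, hr⟩ := hp2
      have hx : wA2 <+: rp wA1 t := by
        rw [← hr]
        have m1 : ¬ wA1 <+: ('y' :: 'e' :: r) := notpre_head rfl (by decide)
        have m2 : ¬ wA1 <+: ('e' :: r) := notpre_head rfl (by decide)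
        show wA2 <+: rp wA1 ('y' :: 'e' :: r)
        rw [rp_neg m1, rp_neg m2]
        exact ⟨rp wA1 r, rfl⟩
      have hin : PySem.Chars.isIn (wA2 ++ wA2) ('y' :: 'e' :: rp wA1 t) = true :=
        isIn_of_prefix (List.cons_prefix_cons.mpr ⟨rfl, List.cons_prefix_cons.mpr ⟨rfl, hx⟩⟩)
      unfold chk2
      rw [if_pos hin, Z_head_false _ (by decide)]
    · rw [if_neg hp2]
      have hx' : ¬ wA2 <+: rp wA1 t := fun h => hp2 (stab2_fwd h)
      unfold chk2
      have pb1 : (wA2 ++ wA2).isPrefixOf ('y' :: 'e' :: rp wA1 t) = false := by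
        rw [← Bool.not_eq_true, List.isPrefixOf_iff_prefix]
        intro h
        exact hx' (List.cons_prefix_cons.mp (List.cons_prefix_cons.mp h).2).2
      have n2b : ¬ wA2 <+: ('e' :: rp wA1 t) := notpre_head rfl (by decide)
      have e2 : PySem.Chars.isIn (wA2 ++ wA2) ('y' :: 'e' :: rp wA1 t)
          = PySem.Chars.isIn (wA2 ++ wA2) (rp wA1 t) := by
        rw [isIn_cons, pb1, isIn_cons, notpre_dbl n2b, Bool.false_or, Bool.false_or]
      have r2 : rp wA2 ('y' :: 'e' :: rp wA1 t) = ' ' :: rp wA2 (rp wA1 t) := by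
        rw [rp_pos (by decide) (⟨rp wA1 t, rfl⟩ : wA2 <+: ('y' :: 'e' :: rp wA1 t))]
        rfl
      rw [e2]
      by_cases hd2 : PySem.Chars.isIn (wA2 ++ wA2) (rp wA1 t) = true
      · rw [if_pos hd2, if_pos hd2, Z_head_false _ (by decide),
          Z_false_of_isIn (c := 'y') (by decide) (by decide) hd2]
      · rw [if_neg hd2, if_neg hd2, r2, chk3_space]

lemma tok1 (t : List Char) : chkA (wA1 ++ t) = if wA1 <+: t then false else chkA t := by
  show chkA ('a' :: 'y' :: 'a' :: t) = _
  by_cases hp1 : wA1 <+: t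
  · rw [if_pos hp1]
    obtain ⟨r, hr⟩ := hp1
    have hin : PySem.Chars.isIn (wA1 ++ wA1) ('a' :: 'y' :: 'a' :: t) = true := by
      refine isIn_of_prefix ?_
      rw [← hr]
      exact ⟨r, rfl⟩
    unfold chkA
    rw [if_pos hin, Z_head_false _ (by decide)]
  · rw [if_neg hp1]
    by_cases hya : ['y','a','a','y','a'] <+: t
    · have hin : PySem.Chars.isIn (wA1 ++ wA1) ('a' :: 'y' :: 'a' :: t) = true := by
        rw [isIn_cons, isIn_cons, isIn_cons]
        have : (wA1 ++ wA1).isPrefixOf ('a' :: t) = true := by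
          rw [List.isPrefixOf_iff_prefix]
          exact List.cons_prefix_cons.mpr ⟨rfl, hya⟩
        rw [this]
        simp
      have hL : chkA ('a' :: 'y' :: 'a' :: t) = false := by
        unfold chkA
        rw [if_pos hin]
        exact Z_head_false _ (by decide)
      obtain ⟨r, hr⟩ := hya
      have ht : t = 'y' :: 'a' :: 'a' :: 'y' :: 'a' :: r := by rw [← hr]; rfl
      subst ht
      have h2 : ¬ wA2 <+: ('y' :: 'a' :: 'a' :: 'y' :: 'a' :: r) := by
        intro h
        have := single_prefix.mp (List.cons_prefix_cons.mp h).2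
        simp at this
      have hR : chkA ('y' :: 'a' :: 'a' :: 'y' :: 'a' :: r) = false := by
        rw [chkA_cons' (notpre_head rfl (by decide)) h2 (notpre_head rfl (by decide))
          (notpre_head rfl (by decide))]
        simp [show PySem.Chars.isspace 'y' = false from by decide]
      rw [hL, hR]
    · have n2 : ¬ wA1 <+: ('y' :: 'a' :: t) := notpre_head rfl (by decide)
      have pb1 : (wA1 ++ wA1).isPrefixOf ('a' :: 'y' :: 'a' :: t) = false := by
        rw [← Bool.not_eq_true, List.isPrefixOf_iff_prefix]
        intro h
        exact hp1 (List.cons_prefix_cons.mp (List.cons_prefix_cons.mp (List.cons_prefix_cons.mp h).2).2).2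
      have pb3 : (wA1 ++ wA1).isPrefixOf ('a' :: t) = false := by
        rw [← Bool.not_eq_true, List.isPrefixOf_iff_prefix]
        intro h
        exact hya (List.cons_prefix_cons.mp h).2
      have e1 : PySem.Chars.isIn (wA1 ++ wA1) ('a' :: 'y' :: 'a' :: t)
          = PySem.Chars.isIn (wA1 ++ wA1) t := by
        rw [isIn_cons, pb1, isIn_cons, notpre_dbl n2, isIn_cons, pb3]
        simp
      have r1 : rp wA1 ('a' :: 'y' :: 'a' :: t) = ' ' :: rp wA1 t := by
        rw [rp_pos (by decide) (⟨t, rfl⟩ : wA1 <+: ('a' :: 'y' :: 'a' :: t))]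
        rfl
      unfold chkA
      rw [e1, r1]
      by_cases hd1 : PySem.Chars.isIn (wA1 ++ wA1) t = true
      · rw [if_pos hd1, if_pos hd1, Z_head_false _ (by decide),
          Z_false_of_isIn (c := 'a') (by decide) (by decide) hd1]
      · rw [if_neg hd1, if_neg hd1, chk2_space]

lemma tok3 (t : List Char) : chkA (wA3 ++ t) = if wA3 <+: t then false else chkA t := by
  show chkA ('w' :: 'o' :: 'o' :: t) = _
  have n1a : ¬ wA1 <+: ('w' :: 'o' :: 'o' :: t) := notpre_head rfl (by decide)
  have n1b : ¬ wA1 <+: ('o' :: 'o' :: t) := notpre_head rfl (by decide)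
  have n1c : ¬ wA1 <+: ('o' :: t) := notpre_head rfl (by decide)
  have e1 : PySem.Chars.isIn (wA1 ++ wA1) ('w' :: 'o' :: 'o' :: t)
      = PySem.Chars.isIn (wA1 ++ wA1) t := by
    rw [isIn_cons, notpre_dbl n1a, isIn_cons, notpre_dbl n1b, isIn_cons, notpre_dbl n1c]
    simp
  have r1 : rp wA1 ('w' :: 'o' :: 'o' :: t) = 'w' :: 'o' :: 'o' :: rp wA1 t := by
    rw [rp_neg n1a, rp_neg n1b, rp_neg n1c]
  unfold chkA
  rw [e1, r1]
  by_cases hd1 : PySem.Chars.isIn (wA1 ++ wA1) t = true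
  · rw [if_pos hd1, if_pos hd1, Z_head_false _ (by decide),
      Z_false_of_isIn (c := 'a') (by decide) (by decide) hd1]
    simp
  · rw [if_neg hd1, if_neg hd1]
    have n2a : ¬ wA2 <+: ('w' :: 'o' :: 'o' :: rp wA1 t) := notpre_head rfl (by decide)
    have n2b : ¬ wA2 <+: ('o' :: 'o' :: rp wA1 t) := notpre_head rfl (by decide)
    have n2c : ¬ wA2 <+: ('o' :: rp wA1 t) := notpre_head rfl (by decide)
    have e2 : PySem.Chars.isIn (wA2 ++ wA2) ('w' :: 'o' :: 'o' :: rp wA1 t)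
        = PySem.Chars.isIn (wA2 ++ wA2) (rp wA1 t) := by
      rw [isIn_cons, notpre_dbl n2a, isIn_cons, notpre_dbl n2b, isIn_cons, notpre_dbl n2c]
      simp
    have r2 : rp wA2 ('w' :: 'o' :: 'o' :: rp wA1 t) = 'w' :: 'o' :: 'o' :: rp wA2 (rp wA1 t) := by
      rw [rp_neg n2a, rp_neg n2b, rp_neg n2c]
    unfold chk2
    rw [e2, r2]
    by_cases hd2 : PySem.Chars.isIn (wA2 ++ wA2) (rp wA1 t) = true
    · rw [if_pos hd2, if_pos hd2, Z_head_false _ (by decide),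
        Z_false_of_isIn (c := 'y') (by decide) (by decide) hd2]
      simp
    · rw [if_neg hd2, if_neg hd2]
      by_cases hp3 : wA3 <+: t
      · rw [if_pos hp3]
        obtain ⟨r, hr⟩ := hp3
        have ht : t = 'w' :: 'o' :: 'o' :: r := by rw [← hr]; rfl
        subst ht
        have m1a : ¬ wA1 <+: ('w' :: 'o' :: 'o' :: r) := notpre_head rfl (by decide)
        have m1b : ¬ wA1 <+: ('o' :: 'o' :: r) := notpre_head rfl (by decide)
        have m1c : ¬ wA1 <+: ('o' :: r) := notpre_head rfl (by decide)
        have hx : rp wA1 ('w' :: 'o' :: 'o' :: r) = 'w' :: 'o' :: 'o' :: rp wA1 r := by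
          rw [rp_neg m1a, rp_neg m1b, rp_neg m1c]
        have m2a : ¬ wA2 <+: ('w' :: 'o' :: 'o' :: rp wA1 r) := notpre_head rfl (by decide)
        have m2b : ¬ wA2 <+: ('o' :: 'o' :: rp wA1 r) := notpre_head rfl (by decide)
        have m2c : ¬ wA2 <+: ('o' :: rp wA1 r) := notpre_head rfl (by decide)
        have hy : rp wA2 (rp wA1 ('w' :: 'o' :: 'o' :: r))
            = 'w' :: 'o' :: 'o' :: rp wA2 (rp wA1 r) := by
          rw [hx, rp_neg m2a, rp_neg m2b, rp_neg m2c]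
        have hin : PySem.Chars.isIn (wA3 ++ wA3)
            ('w' :: 'o' :: 'o' :: rp wA2 (rp wA1 ('w' :: 'o' :: 'o' :: r))) = true := by
          refine isIn_of_prefix ?_
          rw [hy]
          exact List.cons_prefix_cons.mpr ⟨rfl, List.cons_prefix_cons.mpr ⟨rfl,
            List.cons_prefix_cons.mpr ⟨rfl, ⟨_, rfl⟩⟩⟩⟩
        unfold chk3
        rw [if_pos hin, Z_head_false _ (by decide)]
      · rw [if_neg hp3]
        have hx' : ¬ wA3 <+: rp wA2 (rp wA1 t) := fun h => hp3 (stab3_fwd h)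
        have pb1 : (wA3 ++ wA3).isPrefixOf ('w' :: 'o' :: 'o' :: rp wA2 (rp wA1 t)) = false := by
          rw [← Bool.not_eq_true, List.isPrefixOf_iff_prefix]
          intro h
          exact hx' (List.cons_prefix_cons.mp (List.cons_prefix_cons.mp
            (List.cons_prefix_cons.mp h).2).2).2
        have n3b : ¬ wA3 <+: ('o' :: 'o' :: rp wA2 (rp wA1 t)) := notpre_head rfl (by decide)
        have n3c : ¬ wA3 <+: ('o' :: rp wA2 (rp wA1 t)) := notpre_head rfl (by decide)
        have e3 : PySem.Chars.isIn (wA3 ++ wA3) ('w' :: 'o' :: 'o' :: rp wA2 (rp wA1 t))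
            = PySem.Chars.isIn (wA3 ++ wA3) (rp wA2 (rp wA1 t)) := by
          rw [isIn_cons, pb1, isIn_cons, notpre_dbl n3b, isIn_cons, notpre_dbl n3c]
          simp
        have r3 : rp wA3 ('w' :: 'o' :: 'o' :: rp wA2 (rp wA1 t))
            = ' ' :: rp wA3 (rp wA2 (rp wA1 t)) := by
          rw [rp_pos (by decide) (⟨rp wA2 (rp wA1 t), rfl⟩ :
            wA3 <+: ('w' :: 'o' :: 'o' :: rp wA2 (rp wA1 t)))]
          rfl
        unfold chk3
        rw [e3, r3]
        by_cases hd3 : PySem.Chars.isIn (wA3 ++ wA3) (rp wA2 (rp wA1 t)) = true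
        · rw [if_pos hd3, if_pos hd3, Z_head_false _ (by decide),
            Z_false_of_isIn (c := 'w') (by decide) (by decide) hd3]
        · rw [if_neg hd3, if_neg hd3, chk4_space]

lemma Z_space (y : List Char) : Z (' ' :: y) = Z y := by
  rw [Z_cons, show PySem.Chars.isspace ' ' = true from by decide, Bool.true_and]

lemma tok4 (t : List Char) : chkA (wA4 ++ t) = if wA4 <+: t then false else chkA t := by
  show chkA ('m' :: 'a' :: t) = _
  have n1a : ¬ wA1 <+: ('m' :: 'a' :: t) := notpre_head rfl (by decide)
  by_cases hya2 : ['y','a'] <+: t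
  · -- t starts "ya": the replacement of "aya" eats across the token boundary
    obtain ⟨t₂, ht⟩ := hya2
    have ht' : t = 'y' :: 'a' :: t₂ := by rw [← ht]; rfl
    subst ht'
    by_cases hya5 : ['y','a','a','y','a'] <+: ('y' :: 'a' :: t₂)
    · -- "ayaaya" occurs: both sides break
      have hin : PySem.Chars.isIn (wA1 ++ wA1) ('m' :: 'a' :: 'y' :: 'a' :: t₂) = true := by
        rw [isIn_cons, isIn_cons]
        have : (wA1 ++ wA1).isPrefixOf ('a' :: 'y' :: 'a' :: t₂) = true := by
          rw [List.isPrefixOf_iff_prefix]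
          exact List.cons_prefix_cons.mpr ⟨rfl, hya5⟩
        rw [this]
        simp
      have hL : chkA ('m' :: 'a' :: 'y' :: 'a' :: t₂) = false := by
        unfold chkA
        rw [if_pos hin]
        exact Z_head_false _ (by decide)
      obtain ⟨r, hr⟩ := hya5
      have ht2 : t₂ = 'a' :: 'y' :: 'a' :: r := by
        have := hr
        simp at this
        exact this.symm
      subst ht2
      have h2 : ¬ wA2 <+: ('y' :: 'a' :: 'a' :: 'y' :: 'a' :: r) := by
        intro h
        have := single_prefix.mp (List.cons_prefix_cons.mp h).2
        simp at this
      have hR : chkA ('y' :: 'a' :: 'a' :: 'y' :: 'a' :: r) = false := by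
        rw [chkA_cons' (notpre_head rfl (by decide)) h2 (notpre_head rfl (by decide))
          (notpre_head rfl (by decide))]
        simp [show PySem.Chars.isspace 'y' = false from by decide]
      rw [hL, hR]
      simp
    · -- "ya…" but not "yaaya…": the leftover 'm' survives on both sides
      have pb : (wA1 ++ wA1).isPrefixOf ('a' :: 'y' :: 'a' :: t₂) = false := by
        rw [← Bool.not_eq_true, List.isPrefixOf_iff_prefix]
        intro h
        exact hya5 (List.cons_prefix_cons.mp h).2
      have e1 : PySem.Chars.isIn (wA1 ++ wA1) ('m' :: 'a' :: 'y' :: 'a' :: t₂)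
          = PySem.Chars.isIn (wA1 ++ wA1) ('y' :: 'a' :: t₂) := by
        rw [isIn_cons, notpre_dbl n1a, isIn_cons, pb]
        have n1y : ¬ wA1 <+: ('y' :: 'a' :: t₂) := notpre_head rfl (by decide)
        rw [isIn_cons, notpre_dbl n1y]
        simp
      have r1 : rp wA1 ('m' :: 'a' :: 'y' :: 'a' :: t₂) = 'm' :: ' ' :: rp wA1 t₂ := by
        rw [rp_neg n1a,
          rp_pos (by decide) (⟨t₂, rfl⟩ : wA1 <+: ('a' :: 'y' :: 'a' :: t₂))]
        rfl
      unfold chkA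
      rw [e1, r1]
      by_cases hd1 : PySem.Chars.isIn (wA1 ++ wA1) ('y' :: 'a' :: t₂) = true
      · rw [if_pos hd1, if_pos hd1, Z_head_false _ (by decide), Z_head_false _ (by decide)]
        simp
      · rw [if_neg hd1, if_neg hd1]
        have hL : chk2 ('m' :: ' ' :: rp wA1 t₂) = false := by
          have h4 : ¬ wA4 <+: ('m' :: ' ' :: rp wA1 t₂) := by
            intro h
            have := single_prefix.mp (List.cons_prefix_cons.mp h).2
            simp at this
          rw [chk2_cons' (notpre_head rfl (by decide)) (notpre_head rfl (by decide)) h4]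
          simp [show PySem.Chars.isspace 'm' = false from by decide]
        have n1y : ¬ wA1 <+: ('y' :: 'a' :: t₂) := notpre_head rfl (by decide)
        have r1' : rp wA1 ('y' :: 'a' :: t₂) = 'y' :: rp wA1 ('a' :: t₂) := rp_neg n1y
        have hR : chk2 (rp wA1 ('y' :: 'a' :: t₂)) = false := by
          rw [r1']
          have h2 : ¬ wA2 <+: ('y' :: rp wA1 ('a' :: t₂)) := by
            intro h
            have he : (rp wA1 ('a' :: t₂)).head? = some 'e' :=
              single_prefix.mp (List.cons_prefix_cons.mp h).2
            rw [rp_head? (by decide)] at he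
            split_ifs at he with h'
            · simp at he
            · simp at he
          rw [chk2_cons' h2 (notpre_head rfl (by decide)) (notpre_head rfl (by decide))]
          simp [show PySem.Chars.isspace 'y' = false from by decide]
        rw [hL, hR]
        simp
  · -- t does not start with "ya": clean peeling through every stage
    have n1b : ¬ wA1 <+: ('a' :: t) := by
      intro h
      exact hya2 (List.cons_prefix_cons.mp h).2
    have pb : (wA1 ++ wA1).isPrefixOf ('a' :: t) = false := by
      rw [← Bool.not_eq_true, List.isPrefixOf_iff_prefix]
      intro h
      exact hya2 (List.IsPrefix.trans ⟨['a','y','a'], rfl⟩ (List.cons_prefix_cons.mp h).2)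
    have e1 : PySem.Chars.isIn (wA1 ++ wA1) ('m' :: 'a' :: t)
        = PySem.Chars.isIn (wA1 ++ wA1) t := by
      rw [isIn_cons, notpre_dbl n1a, isIn_cons, pb]
      simp
    have r1 : rp wA1 ('m' :: 'a' :: t) = 'm' :: 'a' :: rp wA1 t := by
      rw [rp_neg n1a, rp_neg n1b]
    unfold chkA
    rw [e1, r1]
    by_cases hd1 : PySem.Chars.isIn (wA1 ++ wA1) t = true
    · rw [if_pos hd1, if_pos hd1, Z_head_false _ (by decide),
        Z_false_of_isIn (c := 'a') (by decide) (by decide) hd1]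
      simp
    · rw [if_neg hd1, if_neg hd1]
      have n2a : ¬ wA2 <+: ('m' :: 'a' :: rp wA1 t) := notpre_head rfl (by decide)
      have n2b : ¬ wA2 <+: ('a' :: rp wA1 t) := notpre_head rfl (by decide)
      have e2 : PySem.Chars.isIn (wA2 ++ wA2) ('m' :: 'a' :: rp wA1 t)
          = PySem.Chars.isIn (wA2 ++ wA2) (rp wA1 t) := by
        rw [isIn_cons, notpre_dbl n2a, isIn_cons, notpre_dbl n2b]
        simp
      have r2 : rp wA2 ('m' :: 'a' :: rp wA1 t) = 'm' :: 'a' :: rp wA2 (rp wA1 t) := by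
        rw [rp_neg n2a, rp_neg n2b]
      unfold chk2
      rw [e2, r2]
      by_cases hd2 : PySem.Chars.isIn (wA2 ++ wA2) (rp wA1 t) = true
      · rw [if_pos hd2, if_pos hd2, Z_head_false _ (by decide),
          Z_false_of_isIn (c := 'y') (by decide) (by decide) hd2]
        simp
      · rw [if_neg hd2, if_neg hd2]
        have n3a : ¬ wA3 <+: ('m' :: 'a' :: rp wA2 (rp wA1 t)) := notpre_head rfl (by decide)
        have n3b : ¬ wA3 <+: ('a' :: rp wA2 (rp wA1 t)) := notpre_head rfl (by decide)
        have e3 : PySem.Chars.isIn (wA3 ++ wA3) ('m' :: 'a' :: rp wA2 (rp wA1 t))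
            = PySem.Chars.isIn (wA3 ++ wA3) (rp wA2 (rp wA1 t)) := by
          rw [isIn_cons, notpre_dbl n3a, isIn_cons, notpre_dbl n3b]
          simp
        have r3 : rp wA3 ('m' :: 'a' :: rp wA2 (rp wA1 t))
            = 'm' :: 'a' :: rp wA3 (rp wA2 (rp wA1 t)) := by
          rw [rp_neg n3a, rp_neg n3b]
        unfold chk3
        rw [e3, r3]
        by_cases hd3 : PySem.Chars.isIn (wA3 ++ wA3) (rp wA2 (rp wA1 t)) = true
        · rw [if_pos hd3, if_pos hd3, Z_head_false _ (by decide),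
            Z_false_of_isIn (c := 'w') (by decide) (by decide) hd3]
          simp
        · rw [if_neg hd3, if_neg hd3]
          by_cases hp4 : wA4 <+: t
          · rw [if_pos hp4]
            obtain ⟨r, hr⟩ := hp4
            have ht : t = 'm' :: 'a' :: r := by rw [← hr]; rfl
            subst ht
            have hz0 : rp wA3 (rp wA2 (rp wA1 ('m' :: 'a' :: r)))
                = 'm' :: rp wA3 (rp wA2 (rp wA1 ('a' :: r))) := by
              have k1 : ¬ wA1 <+: ('m' :: 'a' :: r) := notpre_head rfl (by decide)
              rw [rp_neg k1]
              have k2 : ¬ wA2 <+: ('m' :: rp wA1 ('a' :: r)) := notpre_head rfl (by decide)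
              rw [rp_neg k2]
              have k3 : ¬ wA3 <+: ('m' :: rp wA2 (rp wA1 ('a' :: r))) := notpre_head rfl (by decide)
              rw [rp_neg k3]
            unfold chk4
            by_cases hd4 : PySem.Chars.isIn (wA4 ++ wA4)
                ('m' :: 'a' :: rp wA3 (rp wA2 (rp wA1 ('m' :: 'a' :: r)))) = true
            · rw [if_pos hd4, Z_head_false _ (by decide)]
            · rw [if_neg hd4]
              have hnp : ¬ wA4 <+: rp wA3 (rp wA2 (rp wA1 ('m' :: 'a' :: r))) := by
                intro h
                apply hd4
                exact isIn_of_prefix (List.cons_prefix_cons.mpr ⟨rfl,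
                  List.cons_prefix_cons.mpr ⟨rfl, h⟩⟩)
              have r4 : rp wA4 ('m' :: 'a' :: rp wA3 (rp wA2 (rp wA1 ('m' :: 'a' :: r))))
                  = ' ' :: rp wA4 (rp wA3 (rp wA2 (rp wA1 ('m' :: 'a' :: r)))) := by
                rw [rp_pos (by decide) (⟨_, rfl⟩ :
                  wA4 <+: ('m' :: 'a' :: rp wA3 (rp wA2 (rp wA1 ('m' :: 'a' :: r)))))]
                rfl
              rw [r4, Z_space]
              conv_lhs => rw [hz0]
              rw [rp_neg (hz0 ▸ hnp), Z_head_false _ (by decide)]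
          · rw [if_neg hp4]
            have hz' : ¬ wA4 <+: rp wA3 (rp wA2 (rp wA1 t)) := fun h => hp4 (stab4_fwd h)
            have pb4 : (wA4 ++ wA4).isPrefixOf ('m' :: 'a' :: rp wA3 (rp wA2 (rp wA1 t))) = false := by
              rw [← Bool.not_eq_true, List.isPrefixOf_iff_prefix]
              intro h
              exact hz' (List.cons_prefix_cons.mp (List.cons_prefix_cons.mp h).2).2
            have n4b : ¬ wA4 <+: ('a' :: rp wA3 (rp wA2 (rp wA1 t))) := notpre_head rfl (by decide)
            have e4 : PySem.Chars.isIn (wA4 ++ wA4) ('m' :: 'a' :: rp wA3 (rp wA2 (rp wA1 t)))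
                = PySem.Chars.isIn (wA4 ++ wA4) (rp wA3 (rp wA2 (rp wA1 t))) := by
              rw [isIn_cons, pb4, isIn_cons, notpre_dbl n4b]
              simp
            have r4 : rp wA4 ('m' :: 'a' :: rp wA3 (rp wA2 (rp wA1 t)))
                = ' ' :: rp wA4 (rp wA3 (rp wA2 (rp wA1 t))) := by
              rw [rp_pos (by decide) (⟨_, rfl⟩ :
                wA4 <+: ('m' :: 'a' :: rp wA3 (rp wA2 (rp wA1 t))))]
              rfl
            unfold chk4
            rw [e4, r4]
            by_cases hd4 : PySem.Chars.isIn (wA4 ++ wA4) (rp wA3 (rp wA2 (rp wA1 t))) = true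
            · rw [if_pos hd4, if_pos hd4, Z_head_false _ (by decide),
                Z_false_of_isIn (c := 'm') (by decide) (by decide) hd4]
            · rw [if_neg hd4, if_neg hd4, Z_space]

lemma okGo_eq : ∀ (fuel : Nat) (l : List Char) (prev : Option (List Char)),
    l.length ≤ fuel → okGo fuel l prev = okB l prev := by
  intro fuel
  induction fuel using Nat.strong_induction_on with
  | _ fuel ih =>
    rcases fuel with _ | n
    · intro l prev hl
      have : l = [] := by simpa using List.eq_nil_of_length_eq_zero (Nat.le_zero.mp hl)
      subst this
      rfl
    · intro l prev hl
      cases l with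
      | nil => rfl
      | cons c t =>
        show okGo (n+1) (c :: t) prev = okGo (t.length + 1) (c :: t) prev
        rw [okGo, okGo]
        by_cases hc : PySem.Chars.isspace c = true
        · rw [if_pos hc, if_pos hc]
          have ht : t.length ≤ n := by simpa using Nat.lt_succ_iff.mp (by simpa using hl)
          rw [ih n (Nat.lt_succ_self n) t none ht]
          exact (ih t.length (by omega) t none le_rfl).symm
        · rw [if_neg hc, if_neg hc]
          cases hf : wordsB.find? (fun w => PySem.Chars.startswith (c :: t) w && (some w != prev)) with
          | none => rfl
          | some w =>
            have hw : w ∈ wordsB := List.mem_of_find?_eq_some hf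
            have hwl : 0 < w.length := by
              rcases (by simpa [wordsB] using hw :
                w = ['a','y','a'] ∨ w = ['y','e'] ∨ w = ['w','o','o'] ∨ w = ['m','a']) with
                rfl | rfl | rfl | rfl <;> decide
            have ht : t.length ≤ n := by simpa using Nat.lt_succ_iff.mp (by simpa using hl)
            have hd : (List.drop w.length (c :: t)).length ≤ n := by
              simp only [List.length_drop, List.length_cons]
              omega
            have hd2 : (List.drop w.length (c :: t)).length ≤ t.length := by
              simp only [List.length_drop, List.length_cons]
              omega
            show okGo n (List.drop w.length (c :: t)) (some w)
              = okGo t.length (List.drop w.length (c :: t)) (some w)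
            rw [ih n (Nat.lt_succ_self n) _ _ hd]
            exact (ih t.length (by omega) _ _ hd2).symm

lemma okB_cons (c : Char) (t : List Char) (prev : Option (List Char)) :
    okB (c :: t) prev =
      if PySem.Chars.isspace c then okB t none
      else
        match wordsB.find? (fun w => PySem.Chars.startswith (c :: t) w && (some w != prev)) with
        | some w => okB ((c :: t).drop w.length) (some w)
        | none => false := by
  show okGo (t.length + 1) (c :: t) prev = _
  rw [okGo]
  by_cases hc : PySem.Chars.isspace c = true
  · rw [if_pos hc, if_pos hc]
    rfl
  · rw [if_neg hc, if_neg hc]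
    cases hf : wordsB.find? (fun w => PySem.Chars.startswith (c :: t) w && (some w != prev)) with
    | none => rfl
    | some w =>
      have hw : w ∈ wordsB := List.mem_of_find?_eq_some hf
      have hwl : 0 < w.length := by
        rcases (by simpa [wordsB] using hw :
          w = ['a','y','a'] ∨ w = ['y','e'] ∨ w = ['w','o','o'] ∨ w = ['m','a']) with
          rfl | rfl | rfl | rfl <;> decide
      show okGo t.length (List.drop w.length (c :: t)) (some w) = okB (List.drop w.length (c :: t)) (some w)
      exact okGo_eq t.length _ _ (by simp only [List.length_drop, List.length_cons]; omega)

lemma sw_false {s w : List Char} (h : ¬ w <+: s) : PySem.Chars.startswith s w = false := by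
  rw [PySem.Chars.startswith, ← Bool.not_eq_true, List.isPrefixOf_iff_prefix]
  exact h

lemma sw_true {s w : List Char} (h : w <+: s) : PySem.Chars.startswith s w = true := by
  rw [PySem.Chars.startswith, List.isPrefixOf_iff_prefix]
  exact h

lemma bne_some {w : List Char} {prev : Option (List Char)} (h : prev ≠ some w) :
    (some w != prev) = true :=
  bne_iff_ne.mpr (fun he => h he.symm)

lemma okB_space {c : Char} (t : List Char) (prev : Option (List Char))
    (hc : PySem.Chars.isspace c = true) : okB (c :: t) prev = okB t none := by
  rw [okB_cons, if_pos hc]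

lemma okB_dead {c : Char} {t : List Char} (prev : Option (List Char))
    (hc : PySem.Chars.isspace c = false) (h1 : ¬ wA1 <+: (c :: t)) (h2 : ¬ wA2 <+: (c :: t))
    (h3 : ¬ wA3 <+: (c :: t)) (h4 : ¬ wA4 <+: (c :: t)) :
    okB (c :: t) prev = false := by
  rw [okB_cons, if_neg (by simp [hc])]
  have hf : wordsB.find? (fun w => PySem.Chars.startswith (c :: t) w && (some w != prev)) = none := by
    rw [List.find?_eq_none]
    intro w hw
    rcases (by simpa [wordsB] using hw :
      w = ['a','y','a'] ∨ w = ['y','e'] ∨ w = ['w','o','o'] ∨ w = ['m','a']) with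
      rfl | rfl | rfl | rfl
    · simp [show PySem.Chars.startswith (c :: t) ['a','y','a'] = false from sw_false h1]
    · simp [show PySem.Chars.startswith (c :: t) ['y','e'] = false from sw_false h2]
    · simp [show PySem.Chars.startswith (c :: t) ['w','o','o'] = false from sw_false h3]
    · simp [show PySem.Chars.startswith (c :: t) ['m','a'] = false from sw_false h4]
  rw [hf]

lemma sw_head_false {c d : Char} (hne : d ≠ c) (t ws : List Char) :
    PySem.Chars.startswith (c :: t) (d :: ws) = false :=
  sw_false (notpre_head rfl hne)

lemma okB_tok1 (t : List Char) (prev : Option (List Char)) :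
    okB (wA1 ++ t) prev = if prev = some wA1 then false else okB t (some wA1) := by
  show okB ('a' :: 'y' :: 'a' :: t) prev = _
  rw [okB_cons, if_neg (by decide)]
  by_cases hp : prev = some wA1
  · subst hp
    rw [if_pos rfl]
    have hf : wordsB.find?
        (fun w => PySem.Chars.startswith ('a' :: 'y' :: 'a' :: t) w && (some w != some wA1)) = none := by
      rw [List.find?_eq_none]
      intro w hw
      rcases (by simpa [wordsB] using hw :
        w = ['a','y','a'] ∨ w = ['y','e'] ∨ w = ['w','o','o'] ∨ w = ['m','a']) with
        rfl | rfl | rfl | rfl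
      · simp [wA1]
      · simp [sw_head_false (show ('y':Char) ≠ 'a' from by decide)]
      · simp [sw_head_false (show ('w':Char) ≠ 'a' from by decide)]
      · simp [sw_head_false (show ('m':Char) ≠ 'a' from by decide)]
    rw [hf]
  · rw [if_neg hp]
    have hf : wordsB.find?
        (fun w => PySem.Chars.startswith ('a' :: 'y' :: 'a' :: t) w && (some w != prev))
        = some ['a','y','a'] := by
      show List.find? _ (['a','y','a'] :: ['y','e'] :: ['w','o','o'] :: ['m','a'] :: []) = _
      rw [List.find?_cons_of_pos]
      simp [sw_true (⟨t, rfl⟩ : ['a','y','a'] <+: ('a' :: 'y' :: 'a' :: t)),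
        show (some ['a','y','a'] != prev) = true from bne_some hp]
    rw [hf]
    rfl

lemma okB_tok2 (t : List Char) (prev : Option (List Char)) :
    okB (wA2 ++ t) prev = if prev = some wA2 then false else okB t (some wA2) := by
  show okB ('y' :: 'e' :: t) prev = _
  rw [okB_cons, if_neg (by decide)]
  by_cases hp : prev = some wA2
  · subst hp
    rw [if_pos rfl]
    have hf : wordsB.find?
        (fun w => PySem.Chars.startswith ('y' :: 'e' :: t) w && (some w != some wA2)) = none := by
      rw [List.find?_eq_none]
      intro w hw
      rcases (by simpa [wordsB] using hw :
        w = ['a','y','a'] ∨ w = ['y','e'] ∨ w = ['w','o','o'] ∨ w = ['m','a']) with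
        rfl | rfl | rfl | rfl
      · simp [sw_head_false (show ('a':Char) ≠ 'y' from by decide)]
      · simp [wA2]
      · simp [sw_head_false (show ('w':Char) ≠ 'y' from by decide)]
      · simp [sw_head_false (show ('m':Char) ≠ 'y' from by decide)]
    rw [hf]
  · rw [if_neg hp]
    have hf : wordsB.find?
        (fun w => PySem.Chars.startswith ('y' :: 'e' :: t) w && (some w != prev))
        = some ['y','e'] := by
      show List.find? _ (['a','y','a'] :: ['y','e'] :: ['w','o','o'] :: ['m','a'] :: []) = _
      rw [List.find?_cons_of_neg (by simp [sw_head_false (show ('a':Char) ≠ 'y' from by decide)]),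
        List.find?_cons_of_pos]
      simp [sw_true (⟨t, rfl⟩ : ['y','e'] <+: ('y' :: 'e' :: t)),
        show (some ['y','e'] != prev) = true from bne_some hp]
    rw [hf]
    rfl

lemma okB_tok3 (t : List Char) (prev : Option (List Char)) :
    okB (wA3 ++ t) prev = if prev = some wA3 then false else okB t (some wA3) := by
  show okB ('w' :: 'o' :: 'o' :: t) prev = _
  rw [okB_cons, if_neg (by decide)]
  by_cases hp : prev = some wA3
  · subst hp
    rw [if_pos rfl]
    have hf : wordsB.find?
        (fun w => PySem.Chars.startswith ('w' :: 'o' :: 'o' :: t) w && (some w != some wA3)) = none := by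
      rw [List.find?_eq_none]
      intro w hw
      rcases (by simpa [wordsB] using hw :
        w = ['a','y','a'] ∨ w = ['y','e'] ∨ w = ['w','o','o'] ∨ w = ['m','a']) with
        rfl | rfl | rfl | rfl
      · simp [sw_head_false (show ('a':Char) ≠ 'w' from by decide)]
      · simp [sw_head_false (show ('y':Char) ≠ 'w' from by decide)]
      · simp [wA3]
      · simp [sw_head_false (show ('m':Char) ≠ 'w' from by decide)]
    rw [hf]
  · rw [if_neg hp]
    have hf : wordsB.find?
        (fun w => PySem.Chars.startswith ('w' :: 'o' :: 'o' :: t) w && (some w != prev))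
        = some ['w','o','o'] := by
      show List.find? _ (['a','y','a'] :: ['y','e'] :: ['w','o','o'] :: ['m','a'] :: []) = _
      rw [List.find?_cons_of_neg (by simp [sw_head_false (show ('a':Char) ≠ 'w' from by decide)]),
        List.find?_cons_of_neg (by simp [sw_head_false (show ('y':Char) ≠ 'w' from by decide)]),
        List.find?_cons_of_pos]
      simp [sw_true (⟨t, rfl⟩ : ['w','o','o'] <+: ('w' :: 'o' :: 'o' :: t)),
        show (some ['w','o','o'] != prev) = true from bne_some hp]
    rw [hf]
    rfl

lemma okB_tok4 (t : List Char) (prev : Option (List Char)) :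
    okB (wA4 ++ t) prev = if prev = some wA4 then false else okB t (some wA4) := by
  show okB ('m' :: 'a' :: t) prev = _
  rw [okB_cons, if_neg (by decide)]
  by_cases hp : prev = some wA4
  · subst hp
    rw [if_pos rfl]
    have hf : wordsB.find?
        (fun w => PySem.Chars.startswith ('m' :: 'a' :: t) w && (some w != some wA4)) = none := by
      rw [List.find?_eq_none]
      intro w hw
      rcases (by simpa [wordsB] using hw :
        w = ['a','y','a'] ∨ w = ['y','e'] ∨ w = ['w','o','o'] ∨ w = ['m','a']) with
        rfl | rfl | rfl | rfl
      · simp [sw_head_false (show ('a':Char) ≠ 'm' from by decide)]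
      · simp [sw_head_false (show ('y':Char) ≠ 'm' from by decide)]
      · simp [sw_head_false (show ('w':Char) ≠ 'm' from by decide)]
      · simp [wA4]
    rw [hf]
  · rw [if_neg hp]
    have hf : wordsB.find?
        (fun w => PySem.Chars.startswith ('m' :: 'a' :: t) w && (some w != prev))
        = some ['m','a'] := by
      show List.find? _ (['a','y','a'] :: ['y','e'] :: ['w','o','o'] :: ['m','a'] :: []) = _
      rw [List.find?_cons_of_neg (by simp [sw_head_false (show ('a':Char) ≠ 'm' from by decide)]),
        List.find?_cons_of_neg (by simp [sw_head_false (show ('y':Char) ≠ 'm' from by decide)]),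
        List.find?_cons_of_neg (by simp [sw_head_false (show ('w':Char) ≠ 'm' from by decide)]),
        List.find?_cons_of_pos]
      simp [sw_true (⟨t, rfl⟩ : ['m','a'] <+: ('m' :: 'a' :: t)),
        show (some ['m','a'] != prev) = true from bne_some hp]
    rw [hf]
    rfl

lemma okB_prev_clear {w : List Char} (hw : w ∈ wordsB) {t : List Char} (h : ¬ w <+: t) :
    okB t (some w) = okB t none := by
  cases t with
  | nil => rfl
  | cons c t' =>
    rw [okB_cons, okB_cons]
    by_cases hc : PySem.Chars.isspace c = true
    · rw [if_pos hc, if_pos hc]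
    · rw [if_neg hc, if_neg hc]
      have hs : PySem.Chars.startswith (c :: t') w = false := sw_false h
      rcases (by simpa [wordsB] using hw :
        w = ['a','y','a'] ∨ w = ['y','e'] ∨ w = ['w','o','o'] ∨ w = ['m','a']) with
        rfl | rfl | rfl | rfl
      · simp [wordsB, List.find?, hs, show (some ['y','e'] != some ['a','y','a']) = true from by decide, show (some ['w','o','o'] != some ['a','y','a']) = true from by decide, show (some ['m','a'] != some ['a','y','a']) = true from by decide,
          show ∀ x : List Char, (some x != (none : Option (List Char))) = true from fun _ => rfl]
      · simp [wordsB, List.find?, hs, show (some ['a','y','a'] != some ['y','e']) = true from by decide, show (some ['w','o','o'] != some ['y','e']) = true from by decide, show (some ['m','a'] != some ['y','e']) = true from by decide,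
          show ∀ x : List Char, (some x != (none : Option (List Char))) = true from fun _ => rfl]
      · simp [wordsB, List.find?, hs, show (some ['a','y','a'] != some ['w','o','o']) = true from by decide, show (some ['y','e'] != some ['w','o','o']) = true from by decide, show (some ['m','a'] != some ['w','o','o']) = true from by decide,
          show ∀ x : List Char, (some x != (none : Option (List Char))) = true from fun _ => rfl]
      · simp [wordsB, List.find?, hs, show (some ['a','y','a'] != some ['m','a']) = true from by decide, show (some ['y','e'] != some ['m','a']) = true from by decide, show (some ['w','o','o'] != some ['m','a']) = true from by decide,
          show ∀ x : List Char, (some x != (none : Option (List Char))) = true from fun _ => rfl]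

lemma chkA_nil : chkA [] = true := by
  unfold chkA chk2 chk3 chk4
  rw [rp_nil, rp_nil, rp_nil, rp_nil,
    isIn_nil (by decide : wA1 ++ wA1 ≠ []), isIn_nil (by decide : wA2 ++ wA2 ≠ []),
    isIn_nil (by decide : wA3 ++ wA3 ≠ []), isIn_nil (by decide : wA4 ++ wA4 ≠ [])]
  rfl

lemma notpre_space {w : List Char} {d : Char} {ws : List Char} (hw : w = d :: ws)
    (hd : PySem.Chars.isspace d = false) {c : Char} {t : List Char}
    (hsp : PySem.Chars.isspace c = true) : ¬ w <+: (c :: t) := by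
  subst hw
  intro h
  have hc := (List.cons_prefix_cons.mp h).1
  rw [← hc] at hsp
  rw [hd] at hsp
  exact absurd hsp (by decide)

lemma chkA_eq_okB_aux : ∀ (n : Nat) (l : List Char), l.length ≤ n → chkA l = okB l none := by
  intro n
  induction n with
  | zero =>
    intro l hl
    have : l = [] := by simpa using List.eq_nil_of_length_eq_zero (Nat.le_zero.mp hl)
    subst this
    rw [chkA_nil]
    rfl
  | succ n ih =>
    intro l hl
    cases l with
    | nil => rw [chkA_nil]; rfl
    | cons c t =>
      by_cases hsp : PySem.Chars.isspace c = true
      · have h1 : ¬ wA1 <+: (c :: t) := notpre_space rfl (by decide) hsp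
        have h2 : ¬ wA2 <+: (c :: t) := notpre_space rfl (by decide) hsp
        have h3 : ¬ wA3 <+: (c :: t) := notpre_space rfl (by decide) hsp
        have h4 : ¬ wA4 <+: (c :: t) := notpre_space rfl (by decide) hsp
        rw [chkA_cons' h1 h2 h3 h4, hsp, Bool.true_and, okB_space t none hsp]
        exact ih t (by simpa using Nat.lt_succ_iff.mp (by simpa using hl))
      · have hcf : PySem.Chars.isspace c = false := by simpa using hsp
        by_cases e1 : wA1 <+: (c :: t)
        · obtain ⟨r, hr⟩ := e1
          have hrl : r.length ≤ n := by
            have := congrArg List.length hr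
            simp [wA1] at this
            simp at hl
            omega
          rw [← hr, tok1, okB_tok1, if_neg (show ¬((none : Option (List Char)) = some wA1) from by simp)]
          by_cases q : wA1 <+: r
          · rw [if_pos q]
            obtain ⟨r2, hr2⟩ := q
            rw [← hr2, okB_tok1, if_pos rfl]
          · rw [if_neg q, okB_prev_clear (by decide) q]
            exact ih r hrl
        · by_cases e2 : wA2 <+: (c :: t)
          · obtain ⟨r, hr⟩ := e2
            have hrl : r.length ≤ n := by
              have := congrArg List.length hr
              simp [wA2] at this
              simp at hl
              omega
            rw [← hr, tok2, okB_tok2, if_neg (show ¬((none : Option (List Char)) = some wA2) from by simp)]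
            by_cases q : wA2 <+: r
            · rw [if_pos q]
              obtain ⟨r2, hr2⟩ := q
              rw [← hr2, okB_tok2, if_pos rfl]
            · rw [if_neg q, okB_prev_clear (by decide) q]
              exact ih r hrl
          · by_cases e3 : wA3 <+: (c :: t)
            · obtain ⟨r, hr⟩ := e3
              have hrl : r.length ≤ n := by
                have := congrArg List.length hr
                simp [wA3] at this
                simp at hl
                omega
              rw [← hr, tok3, okB_tok3, if_neg (show ¬((none : Option (List Char)) = some wA3) from by simp)]
              by_cases q : wA3 <+: r
              · rw [if_pos q]
                obtain ⟨r2, hr2⟩ := q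
                rw [← hr2, okB_tok3, if_pos rfl]
              · rw [if_neg q, okB_prev_clear (by decide) q]
                exact ih r hrl
            · by_cases e4 : wA4 <+: (c :: t)
              · obtain ⟨r, hr⟩ := e4
                have hrl : r.length ≤ n := by
                  have := congrArg List.length hr
                  simp [wA4] at this
                  simp at hl
                  omega
                rw [← hr, tok4, okB_tok4, if_neg (show ¬((none : Option (List Char)) = some wA4) from by simp)]
                by_cases q : wA4 <+: r
                · rw [if_pos q]
                  obtain ⟨r2, hr2⟩ := q
                  rw [← hr2, okB_tok4, if_pos rfl]
                · rw [if_neg q, okB_prev_clear (by decide) q]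
                  exact ih r hrl
              · rw [chkA_cons' e1 e2 e3 e4, hcf, Bool.false_and, okB_dead none hcf e1 e2 e3 e4]

lemma chkA_eq_okB (l : List Char) : chkA l = okB l none :=
  chkA_eq_okB_aux l.length l le_rfl

lemma key_len (s : String) : (PySem.Str.len (PySem.Str.strip s) = 0) ↔ (Z s.toList = true) := by
  rw [PySem.Str.len, PySem.Str.strip, String.toList_ofList, ← strip_eq_nil_iff]
  simp [List.length_eq_zero_iff]

lemma strA (b : String) :
    (if PySem.Str.len (PySem.Str.strip (loopA nephewA b)) = 0 then (1 : Int) else 0)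
      = (if chkA b.toList then (1 : Int) else 0) := by
  have r1 : (PySem.Str.replace b "aya" " ").toList = rp wA1 b.toList := by
    rw [PySem.Str.replace, String.toList_ofList]
    exact replace_eq_rp _ (by decide) _
  by_cases c1 : PySem.Chars.isIn (wA1 ++ wA1) b.toList = true
  · have s1 : loopA nephewA b = b := by
      show loopA ("aya" :: ["ye","woo","ma"]) b = b
      rw [loopA, if_pos (show PySem.Str.isIn ("aya" ++ "aya") b = true from c1)]
    rw [s1]
    unfold chkA
    rw [if_pos c1]
    exact if_congr (key_len b) rfl rfl
  · have s1 : loopA nephewA b = loopA ["ye","woo","ma"] (PySem.Str.replace b "aya" " ") := by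
      show loopA ("aya" :: ["ye","woo","ma"]) b = _
      rw [loopA, if_neg (show ¬ PySem.Str.isIn ("aya" ++ "aya") b = true from c1)]
    rw [s1]
    unfold chkA
    rw [if_neg c1]
    set b1 : String := PySem.Str.replace b "aya" " " with hb1
    have r2 : (PySem.Str.replace b1 "ye" " ").toList = rp wA2 (rp wA1 b.toList) := by
      rw [PySem.Str.replace, String.toList_ofList, r1]
      exact replace_eq_rp _ (by decide) _
    by_cases c2 : PySem.Chars.isIn (wA2 ++ wA2) (rp wA1 b.toList) = true
    · have s2 : loopA ["ye","woo","ma"] b1 = b1 := by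
        show loopA ("ye" :: ["woo","ma"]) b1 = b1
        rw [loopA, if_pos (show PySem.Str.isIn ("ye" ++ "ye") b1 = true from by
          rw [PySem.Str.isIn, r1]; exact c2)]
      rw [s2]
      unfold chk2
      rw [if_pos c2]
      have := key_len b1
      rw [r1] at this
      exact if_congr this rfl rfl
    · have s2 : loopA ["ye","woo","ma"] b1 = loopA ["woo","ma"] (PySem.Str.replace b1 "ye" " ") := by
        show loopA ("ye" :: ["woo","ma"]) b1 = _
        rw [loopA, if_neg (show ¬ PySem.Str.isIn ("ye" ++ "ye") b1 = true from by
          rw [PySem.Str.isIn, r1]; exact c2)]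
      rw [s2]
      unfold chk2
      rw [if_neg c2]
      set b2 : String := PySem.Str.replace b1 "ye" " " with hb2
      have r3 : (PySem.Str.replace b2 "woo" " ").toList = rp wA3 (rp wA2 (rp wA1 b.toList)) := by
        rw [PySem.Str.replace, String.toList_ofList, r2]
        exact replace_eq_rp _ (by decide) _
      by_cases c3 : PySem.Chars.isIn (wA3 ++ wA3) (rp wA2 (rp wA1 b.toList)) = true
      · have s3 : loopA ["woo","ma"] b2 = b2 := by
          show loopA ("woo" :: ["ma"]) b2 = b2
          rw [loopA, if_pos (show PySem.Str.isIn ("woo" ++ "woo") b2 = true from by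
            rw [PySem.Str.isIn, r2]; exact c3)]
        rw [s3]
        unfold chk3
        rw [if_pos c3]
        have := key_len b2
        rw [r2] at this
        exact if_congr this rfl rfl
      · have s3 : loopA ["woo","ma"] b2 = loopA ["ma"] (PySem.Str.replace b2 "woo" " ") := by
          show loopA ("woo" :: ["ma"]) b2 = _
          rw [loopA, if_neg (show ¬ PySem.Str.isIn ("woo" ++ "woo") b2 = true from by
            rw [PySem.Str.isIn, r2]; exact c3)]
        rw [s3]
        unfold chk3
        rw [if_neg c3]
        set b3 : String := PySem.Str.replace b2 "woo" " " with hb3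
        have r4 : (PySem.Str.replace b3 "ma" " ").toList = rp wA4 (rp wA3 (rp wA2 (rp wA1 b.toList))) := by
          rw [PySem.Str.replace, String.toList_ofList, r3]
          exact replace_eq_rp _ (by decide) _
        by_cases c4 : PySem.Chars.isIn (wA4 ++ wA4) (rp wA3 (rp wA2 (rp wA1 b.toList))) = true
        · have s4 : loopA ["ma"] b3 = b3 := by
            show loopA ("ma" :: []) b3 = b3
            rw [loopA, if_pos (show PySem.Str.isIn ("ma" ++ "ma") b3 = true from by
              rw [PySem.Str.isIn, r3]; exact c4)]
          rw [s4]
          unfold chk4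
          rw [if_pos c4]
          have := key_len b3
          rw [r3] at this
          exact if_congr this rfl rfl
        · have s4 : loopA ["ma"] b3 = PySem.Str.replace b3 "ma" " " := by
            show loopA ("ma" :: []) b3 = PySem.Str.replace b3 "ma" " "
            rw [loopA, if_neg (show ¬ PySem.Str.isIn ("ma" ++ "ma") b3 = true from by
              rw [PySem.Str.isIn, r3]; exact c4)]
            rfl
          rw [s4]
          unfold chk4
          rw [if_neg c4]
          have := key_len (PySem.Str.replace b3 "ma" " ")
          rw [r4] at this
          exact if_congr this rfl rfl

lemma fold_count (l : List String) : ∀ acc : Int,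
    l.foldl (fun answer b =>
      if PySem.Str.len (PySem.Str.strip (loopA nephewA b)) = 0 then answer + 1 else answer) acc
    = acc + (l.map (fun b => if okB b.toList none then (1 : Int) else 0)).sum := by
  induction l with
  | nil => simp
  | cons b l ih =>
    intro acc
    rw [List.foldl_cons, List.map_cons, List.sum_cons, ih]
    have h := strA b
    rw [chkA_eq_okB] at h
    have step : (if PySem.Str.len (PySem.Str.strip (loopA nephewA b)) = 0 then acc + 1 else acc)
        = acc + (if okB b.toList none then (1 : Int) else 0) := by
      split_ifs at h ⊢ <;> omega
    rw [step]
    ring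


-- ===== VERDICT (by name: the statement is the Claim_ definition above) =====
theorem solution_spec : Claim_equal_solution := by
  intro babbling _
  unfold Spec_solution solution solution_alt
  rw [fold_count]
  simp
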